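-- pv_equiv track=rewrite | github.com/valeryvpetrov-dev/android-apps-similarity | script/library_mask.py | _matches_known_library_prefix
-- ===== SOURCE A (Python) =====
-- KNOWN_LIBRARY_PREFIXES = (
--     "android",
--     "androidx",
--     "com.airbnb",
--     "com.bumptech",
--     "com.facebook",
--     "com.google",
--     "com.squareup",
--     "dagger",
--     "io.reactivex",
--     "java",
--     "javax",
--     "kotlin",
--     "kotlinx",
--     "okhttp3",
--     "okio",
--     "org.apache",
--     "org.bouncycastle",
--     "org.intellij",
--     "org.jetbrains",
--     "org.json",
--     "retrofit2",
--     "rx",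
-- )
--
-- def _matches_known_library_prefix(package: str) -> bool:
--     normalized = _normalize_package(package)
--     if not normalized:
--         return False
--     for prefix in KNOWN_LIBRARY_PREFIXES:
--         if normalized == prefix or normalized.startswith(prefix + "."):
--             return True
--     return normalized.startswith("android.support.")
--
-- def _normalize_package(value: str) -> str:
--     normalized = value.strip().strip(";")
--     if normalized.startswith("L") and "/" in normalized:
--         normalized = normalized[1:]
--     normalized = normalized.replace("/", ".")
--     while ".." in normalized:
--         normalized = normalized.replace("..", ".")
--     return normalized.strip(".")
-- ===== SOURCE B (Python) =====
-- KNOWN_LIBRARY_PREFIXES = (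
--     "android",
--     "androidx",
--     "com.airbnb",
--     "com.bumptech",
--     "com.facebook",
--     "com.google",
--     "com.squareup",
--     "dagger",
--     "io.reactivex",
--     "java",
--     "javax",
--     "kotlin",
--     "kotlinx",
--     "okhttp3",
--     "okio",
--     "org.apache",
--     "org.bouncycastle",
--     "org.intellij",
--     "org.jetbrains",
--     "org.json",
--     "retrofit2",
--     "rx",
-- )
--
-- _KNOWN = frozenset(KNOWN_LIBRARY_PREFIXES)
--
--
-- def _normalize_package(value: str) -> str:
--     normalized = value.strip().strip(";")
--     if normalized.startswith("L") and "/" in normalized: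
--         normalized = normalized[1:]
--     normalized = normalized.replace("/", ".")
--     while ".." in normalized:
--         normalized = normalized.replace("..", ".")
--     return normalized.strip(".")
--
--
-- def _matches_known_library_prefix(package: str) -> bool:
--     normalized = _normalize_package(package)
--     if not normalized:
--         return False
--     # single left-to-right pass: at each dot, test the accumulated component
--     # prefix against the known set; at the end, test the whole name
--     seen = ""
--     for ch in normalized:
--         if ch == "." and seen in _KNOWN:
--             return True
--         seen += ch
--     return seen in _KNOWN
-- ===== Notes on version B (the rewrite author's own statement) =====
-- stated objective: alternative
-- what changed: Instead of scanning the fixed 22-prefix tuple with == / startswith (plus a dead android.support. fallback), B makes one left-to-right pass over the normalized package, testing the accumulated dot-aligned prefix against a precomputed frozenset at each dot and at the end.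
import Mathlib
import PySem

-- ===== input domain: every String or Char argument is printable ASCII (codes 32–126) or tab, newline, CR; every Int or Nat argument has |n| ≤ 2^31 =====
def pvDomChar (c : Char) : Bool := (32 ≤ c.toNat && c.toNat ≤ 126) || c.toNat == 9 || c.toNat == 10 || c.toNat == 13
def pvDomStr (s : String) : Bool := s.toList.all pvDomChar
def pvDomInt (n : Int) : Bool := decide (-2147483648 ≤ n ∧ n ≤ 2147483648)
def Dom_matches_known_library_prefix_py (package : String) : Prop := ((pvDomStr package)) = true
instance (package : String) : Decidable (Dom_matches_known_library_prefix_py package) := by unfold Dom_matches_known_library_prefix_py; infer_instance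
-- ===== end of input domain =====

-- B replaces A's scan of the fixed 22-prefix tuple with startswith (plus a dead
-- android.support. fallback) by a single left-to-right pass over the normalized
-- package that tests each accumulated dot-aligned prefix against a precomputed set
-- (objective: alternative algorithm, same cost class).

-- ===== PORT A =====
def pvKnownLibraryPrefixes : List String :=
  ["android", "androidx", "com.airbnb", "com.bumptech", "com.facebook", "com.google",
   "com.squareup", "dagger", "io.reactivex", "java", "javax", "kotlin", "kotlinx",
   "okhttp3", "okio", "org.apache", "org.bouncycastle", "org.intellij", "org.jetbrains",
   "org.json", "retrofit2", "rx"]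

-- 'while ".." in normalized: normalized = normalized.replace("..", ".")' — each pass
-- strictly shortens the string while ".." occurs, so fuel = length is enough.
def pvCollapseDots : Nat → String → String
  | 0, s => s
  | Nat.succ fuel, s =>
      if PySem.Str.isIn ".." s then pvCollapseDots fuel (PySem.Str.replace s ".." ".") else s

def pvNormalizePackage (value : String) : String :=
  let n := PySem.Str.stripChars (PySem.Str.strip value) ";"
  let n := if PySem.Str.startswith n "L" && PySem.Str.isIn "/" n
           then PySem.Str.slice n (some 1) none else n
  let n := PySem.Str.replace n "/" "."
  let n := pvCollapseDots (PySem.Str.len n).toNat n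
  PySem.Str.stripChars n "."

def pvLoopA : List String → String → Bool
  | [], n => PySem.Str.startswith n "android.support."
  | p :: rest, n =>
      if n == p || PySem.Str.startswith n (p ++ ".") then true else pvLoopA rest n

def matches_known_library_prefix_py (package : String) : Bool :=
  let normalized := pvNormalizePackage package
  if normalized == "" then false
  else pvLoopA pvKnownLibraryPrefixes normalized

-- ===== PORT B =====
-- Source B's module-level _KNOWN = frozenset(KNOWN_LIBRARY_PREFIXES); B works on char
-- lists throughout, so the set holds the prefixes as char lists.
def pvKnownSetChars : PySem.Set (List Char) :=
  PySem.Set.ofList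
    (["android", "androidx", "com.airbnb", "com.bumptech", "com.facebook", "com.google",
      "com.squareup", "dagger", "io.reactivex", "java", "javax", "kotlin", "kotlinx",
      "okhttp3", "okio", "org.apache", "org.bouncycastle", "org.intellij", "org.jetbrains",
      "org.json", "retrofit2", "rx"].map String.toList)

-- the same python _normalize_package, transliterated over List Char via PySem.Chars
def pvSquashDotsChars : Nat → List Char → List Char
  | 0, cs => cs
  | Nat.succ fuel, cs =>
      if PySem.Chars.isIn ['.', '.'] cs
      then pvSquashDotsChars fuel (PySem.Chars.replace cs ['.', '.'] ['.'])
      else cs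

def pvNormalizeChars (value : List Char) : List Char :=
  let c := PySem.Chars.stripChars (PySem.Chars.strip value) [';']
  let c := if PySem.Chars.startswith c ['L'] && PySem.Chars.isIn ['/'] c
           then PySem.Chars.slice c (some 1) none else c
  let c := PySem.Chars.replace c ['/'] ['.']
  let c := pvSquashDotsChars c.length c
  PySem.Chars.stripChars c ['.']

-- 'for ch in normalized: if ch == "." and seen in _KNOWN: return True; seen += ch'
-- then 'return seen in _KNOWN'
def pvScanB : List Char → List Char → Bool
  | [], seen => PySem.Set.contains pvKnownSetChars seen
  | c :: rest, seen =>
      if c == '.' && PySem.Set.contains pvKnownSetChars seen then true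
      else pvScanB rest (seen ++ [c])

def matches_known_library_prefix_py_alt (package : String) : Bool :=
  let normalized := pvNormalizeChars package.toList
  if normalized = [] then false
  else pvScanB normalized []

-- ===== PRECONDITION & SPEC =====
def Spec_matches_known_library_prefix_py (package : String) (out : Bool) : Prop := out = matches_known_library_prefix_py_alt package
instance (package : String) (out : Bool) : Decidable (Spec_matches_known_library_prefix_py package out) := by unfold Spec_matches_known_library_prefix_py; infer_instance

-- ===== CLAIM (what is proved, stated in full; the proofs are below) =====
def Claim_equal_matches_known_library_prefix_py : Prop := ∀ (package : String), Dom_matches_known_library_prefix_py package → Spec_matches_known_library_prefix_py package (matches_known_library_prefix_py package)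

-- ===== LEMMAS AND PROOFS =====

-- the two transliterations of the collapse loop compute the same string
theorem pvSquash_eq_collapse (fuel : Nat) : ∀ (s : String),
    pvSquashDotsChars fuel s.toList = (pvCollapseDots fuel s).toList := by
  induction fuel with
  | zero => intro s; rfl
  | succ fuel ih =>
      intro s
      simp only [pvSquashDotsChars, pvCollapseDots, PySem.Str.isIn_eq,
        show (".." : String).toList = ['.', '.'] from rfl]
      by_cases h : PySem.Chars.isIn ['.', '.'] s.toList = true
      · rw [if_pos h, if_pos h, ← ih, PySem.Str.toList_replace]
        rfl
      · rw [if_neg h, if_neg h]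

-- the two transliterations of _normalize_package compute the same string
theorem pvNorm_eq (value : String) :
    pvNormalizeChars value.toList = (pvNormalizePackage value).toList := by
  simp only [pvNormalizeChars, pvNormalizePackage, PySem.Str.toList_stripChars,
    PySem.Str.toList_strip, PySem.Str.startswith_eq, PySem.Str.isIn_eq,
    PySem.Str.toList_slice, PySem.Str.toList_replace, PySem.Str.len_eq, Int.toNat_natCast,
    apply_ite String.toList, ← pvSquash_eq_collapse, PySem.Chars.slice_eq_listSlice,
    show (";" : String).toList = [';'] from rfl, show ("L" : String).toList = ['L'] from rfl,
    show ("/" : String).toList = ['/'] from rfl, show ("." : String).toList = ['.'] from rfl]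

-- A's loop = any over the prefix list, falling through to the android.support. test
theorem pvLoopA_eq_any (l : List String) (n : String) :
    pvLoopA l n
      = (l.any (fun p => n == p || PySem.Str.startswith n (p ++ ".")) ||
         PySem.Str.startswith n "android.support.") := by
  induction l with
  | nil => simp [pvLoopA]
  | cons p rest ih =>
      simp only [pvLoopA, List.any_cons, ih]
      cases hc : (n == p || PySem.Str.startswith n (p ++ ".")) <;> simp

-- the fallback is subsumed: android.support.* already matched the "android" prefix
theorem pvFallback_subsumed (n : String)
    (h : PySem.Str.startswith n "android.support." = true) :
    pvKnownLibraryPrefixes.any (fun p => n == p || PySem.Str.startswith n (p ++ ".")) = true := by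
  rw [List.any_eq_true]
  refine ⟨"android", by simp [pvKnownLibraryPrefixes], ?_⟩
  have hsw : PySem.Str.startswith n ("android" ++ ".") = true := by
    rw [PySem.Str.startswith_eq, PySem.Chars.startswith_iff] at h ⊢
    rw [String.toList_append]
    refine List.IsPrefix.trans ?_ h
    decide
  rw [hsw, Bool.or_true]

-- p ++ ['.'] is a prefix of cs iff some dot position i of cs has cs.take i = p
theorem pvDotPrefix_iff (p cs : List Char) :
    (p ++ ['.']) <+: cs ↔ ∃ i, i < cs.length ∧ cs[i]? = some '.' ∧ cs.take i = p := by
  constructor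
  · rintro ⟨t, rfl⟩
    refine ⟨p.length, by simp, ?_, ?_⟩
    · simp
    · simp
  · rintro ⟨i, hi, hdot, rfl⟩
    refine ⟨(cs.drop i).tail, ?_⟩
    have hdrop : cs.drop i = '.' :: (cs.drop i).tail := by
      have hh : (cs.drop i).head? = some '.' := by
        rw [List.head?_drop]; exact hdot
      cases hd : cs.drop i with
      | nil => simp [hd] at hh
      | cons a t => simp [hd] at hh ⊢; exact hh
    have heq : cs = cs.take i ++ ['.'] ++ (cs.drop i).tail := by
      conv_lhs => rw [← List.take_append_drop i cs, hdrop]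
      simp
    conv_rhs => rw [heq]

-- membership in B's set = membership (as strings) in A's prefix list
theorem pvContains_iff (l : List Char) :
    PySem.Set.contains pvKnownSetChars l = true
      ↔ ∃ p ∈ pvKnownLibraryPrefixes, l = p.toList := by
  have : PySem.Set.contains pvKnownSetChars l = true
      ↔ l ∈ (pvKnownLibraryPrefixes.map String.toList) := by
    simp [PySem.Set.contains, pvKnownSetChars, PySem.Set.mem_ofList, pvKnownLibraryPrefixes]
  rw [this, List.mem_map]
  constructor
  · rintro ⟨p, hp, rfl⟩; exact ⟨p, hp, rfl⟩
  · rintro ⟨p, hp, rfl⟩; exact ⟨p, hp, rfl⟩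

-- what B's character scan recognises, for any partial state 'seen'
theorem pvScanB_iff (cs : List Char) : ∀ (seen : List Char),
    pvScanB cs seen = true
      ↔ (∃ i, i < cs.length ∧ cs[i]? = some '.' ∧
            PySem.Set.contains pvKnownSetChars (seen ++ cs.take i) = true)
        ∨ PySem.Set.contains pvKnownSetChars (seen ++ cs) = true := by
  induction cs with
  | nil =>
      intro seen
      simp [pvScanB]
  | cons c rest ih =>
      intro seen
      simp only [pvScanB]
      by_cases hc : (c == '.' && PySem.Set.contains pvKnownSetChars seen) = true
      · rw [if_pos hc]
        rw [Bool.and_eq_true, beq_iff_eq] at hc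
        refine iff_of_true rfl (Or.inl ⟨0, by simp, by simp [hc.1], by simpa using hc.2⟩)
      · rw [if_neg hc, ih (seen ++ [c])]
        constructor
        · rintro (⟨i, hi, hdot, hmem⟩ | hall)
          · exact Or.inl ⟨i + 1, by simpa using hi, by simpa using hdot,
              by simpa [List.append_assoc] using hmem⟩
          · exact Or.inr (by simpa [List.append_assoc] using hall)
        · rintro (⟨i, hi, hdot, hmem⟩ | hall)
          · cases i with
            | zero =>
                exfalso
                apply hc
                rw [Bool.and_eq_true, beq_iff_eq]
                exact ⟨by simpa using hdot, by simpa using hmem⟩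
            | succ j =>
                exact Or.inl ⟨j, by simpa using hi, by simpa using hdot,
                  by simpa [List.append_assoc] using hmem⟩
          · exact Or.inr (by simpa [List.append_assoc] using hall)

-- the two match bodies agree on every normalized string n
theorem pvBody_eq (n : String) :
    pvLoopA pvKnownLibraryPrefixes n = pvScanB n.toList [] := by
  apply Bool.coe_iff_coe.mp
  rw [pvLoopA_eq_any, pvScanB_iff]
  have hL : ((pvKnownLibraryPrefixes.any fun p => n == p || PySem.Str.startswith n (p ++ ".")) ||
      PySem.Str.startswith n "android.support.") = true ↔
      (pvKnownLibraryPrefixes.any fun p => n == p || PySem.Str.startswith n (p ++ ".")) = true := by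
    constructor
    · intro h
      rw [Bool.or_eq_true] at h
      rcases h with h | h
      · exact h
      · exact pvFallback_subsumed n h
    · intro h
      rw [Bool.or_eq_true]
      exact Or.inl h
  rw [hL, List.any_eq_true]
  have hper : ∀ p : String, ((n == p || PySem.Str.startswith n (p ++ ".")) = true) ↔
      (n.toList = p.toList ∨
        ∃ i, i < n.toList.length ∧ n.toList[i]? = some '.' ∧ n.toList.take i = p.toList) := by
    intro p
    rw [Bool.or_eq_true, beq_iff_eq, ← String.toList_inj, PySem.Str.startswith_eq,
      String.toList_append, show ("." : String).toList = ['.'] from rfl,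
      PySem.Chars.startswith_iff, pvDotPrefix_iff]
  simp only [hper, pvContains_iff, List.nil_append]
  constructor
  · rintro ⟨p, hp, hnp | ⟨i, hi, hdot, htake⟩⟩
    · exact Or.inr ⟨p, hp, hnp⟩
    · exact Or.inl ⟨i, hi, hdot, p, hp, htake⟩
  · rintro (⟨i, hi, hdot, p, hp, htake⟩ | ⟨p, hp, hnp⟩)
    · exact ⟨p, hp, Or.inr ⟨i, hi, hdot, htake⟩⟩
    · exact ⟨p, hp, Or.inl hnp⟩

-- ===== VERDICT (by name: the statement is the Claim_ definition above) =====
theorem matches_known_library_prefix_py_spec : Claim_equal_matches_known_library_prefix_py := by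
  intro package _
  show matches_known_library_prefix_py package = matches_known_library_prefix_py_alt package
  simp only [matches_known_library_prefix_py, matches_known_library_prefix_py_alt, pvNorm_eq]
  have hiff : ((pvNormalizePackage package).toList = []) ↔ (pvNormalizePackage package = "") := by
    rw [show ([] : List Char) = ("" : String).toList from rfl, String.toList_inj]
  by_cases h : pvNormalizePackage package = ""
  · simp [h]
  · rw [if_neg (fun hx => h (by simpa using hx)), if_neg (fun hx => h (hiff.mp hx)), pvBody_eq]
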